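-- pv_equiv track=rewrite | github.com/BioGeMT/ParaDISM | src/pipeline/mapper_algo_snp_only.py | find_unique_mapping_snp_only
-- ===== SOURCE A (Python) =====
-- from typing import Dict, List, Tuple
-- from collections import defaultdict
--
-- def find_unique_mapping_snp_only(read_scenarios: Dict[str, List], genes: List[str]) -> Tuple[str, bool, str]:
--     """Find unique mapping for SNP-only analysis; returns assignment, strand coverage, and which strand(s) mapped."""
--     plus_data = read_scenarios.get('plus', [])
--     minus_data = read_scenarios.get('minus', [])
--
--     # Check if we have no data at all
--     if not plus_data and not minus_data:
--         return "NONE", False, ""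
--
--     # Determine if we have both strands (paired-end) or just one (single-end)
--     has_both_strands = bool(plus_data and minus_data)
--
--     def check_conditions(scenarios: List, gene: str) -> Tuple[bool, bool]:
--         if not scenarios:
--             return False, False
--
--         all_positions = set()
--         matching_positions = defaultdict(set)
--
--         for scenario in scenarios:
--             for row in scenario:
--                 msa_pos = row['MSA_Position']
--                 all_positions.add(msa_pos)
--                 for g in genes:
--                     if row['Read_Base'].upper() == row[f'{g}_Base'].upper():
--                         matching_positions[g].add(msa_pos)
--
--         # Check condition 1: unique match
--         c1_pass = any(
--             pos in matching_positions[gene] and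
--             all(pos not in matching_positions[g] for g in genes if g != gene)
--             for pos in all_positions
--         )
--
--         # Check condition 2: no contradictions
--         c2_pass = all(
--             pos in matching_positions[gene] or
--             all(pos not in matching_positions[g] for g in genes if g != gene)
--             for pos in all_positions
--         )
--
--         return c1_pass, c2_pass
--
--     mapped_genes = []
--
--     if has_both_strands:
--         # Paired-end logic: require one strand with c1+c2, other strand with c2
--         for gene in genes:
--             plus_c1, plus_c2 = check_conditions(plus_data, gene)
--             minus_c1, minus_c2 = check_conditions(minus_data, gene)
--
--             if ((plus_c1 and plus_c2 and minus_c2) or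
--                 (minus_c1 and minus_c2 and plus_c2)):
--                 mapped_genes.append(gene)
--     else:
--         # Single-end logic: require the available strand to pass both c1 and c2
--         strand_data = plus_data if plus_data else minus_data
--         for gene in genes:
--             c1, c2 = check_conditions(strand_data, gene)
--             if c1 and c2:
--                 mapped_genes.append(gene)
--
--     assignment = mapped_genes[0] if len(mapped_genes) == 1 else "NONE"
--
--     # Determine which strand(s) mapped
--     strand_info = ""
--     if assignment != "NONE":
--         if has_both_strands:
--             strand_info = "both"
--         elif plus_data:
--             strand_info = "plus"
--         elif minus_data:
--             strand_info = "minus"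
--
--     return assignment, has_both_strands, strand_info
-- ===== SOURCE B (Python) =====
-- def find_unique_mapping_snp_only(read_scenarios, genes):
--     """Summarize each strand once into (singleton-winner genes, intersection of nonempty hit sets); each gene's conditions become two membership tests."""
--     plus_data = read_scenarios.get('plus', [])
--     minus_data = read_scenarios.get('minus', [])
--     if not plus_data and not minus_data:
--         return "NONE", False, ""
--     has_both_strands = bool(plus_data and minus_data)
--
--     def strand_summary(scenarios):
--         # pos -> set of genes whose base matches the read base at that MSA position
--         profile = {}
--         for row in (row for scenario in scenarios for row in scenario):
--             rb = row['Read_Base'].upper()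
--             hits = profile.setdefault(row['MSA_Position'], set())
--             for g in genes:
--                 if rb == row[f'{g}_Base'].upper():
--                     hits.add(g)
--         winners = set()   # genes uniquely matching at some position (= condition 1)
--         common = None     # intersection of all nonempty hit sets; None = none seen yet
--         for hits in profile.values():
--             if not hits:
--                 continue
--             if len(hits) == 1:
--                 winners |= hits
--             common = set(hits) if common is None else common & hits
--         return winners, common
--
--     def no_contradiction(summary, gene):   # condition 2
--         return summary[1] is None or gene in summary[1]
--
--     if has_both_strands:
--         ps = strand_summary(plus_data)
--         ms = strand_summary(minus_data)
--         mapped_genes = [g for g in genes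
--                         if no_contradiction(ps, g) and no_contradiction(ms, g)
--                         and (g in ps[0] or g in ms[0])]
--     else:
--         s = strand_summary(plus_data if plus_data else minus_data)
--         mapped_genes = [g for g in genes if g in s[0] and no_contradiction(s, g)]
--
--     assignment = mapped_genes[0] if len(mapped_genes) == 1 else "NONE"
--     strand_info = ""
--     if assignment != "NONE":
--         strand_info = "both" if has_both_strands else ("plus" if plus_data else "minus")
--     return assignment, has_both_strands, strand_info
-- ===== Notes on version B (the rewrite author's own statement) =====
-- stated objective: alternative
-- what changed: A re-scans every row for every candidate gene (check_conditions is called per gene and itself loops over all genes, O(G^2) row work); B scans each strand's flattened rows once into a per-position hit-set profile, reduces that profile once into a pair (winners = genes with a uniquely-matching position, common = intersection of all nonempty hit sets), and then each gene's two conditions become plain membership tests inside a single comprehension, with A's paired-end disjunction factored as p2 and m2 and (p1 or m1).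
import Mathlib
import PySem

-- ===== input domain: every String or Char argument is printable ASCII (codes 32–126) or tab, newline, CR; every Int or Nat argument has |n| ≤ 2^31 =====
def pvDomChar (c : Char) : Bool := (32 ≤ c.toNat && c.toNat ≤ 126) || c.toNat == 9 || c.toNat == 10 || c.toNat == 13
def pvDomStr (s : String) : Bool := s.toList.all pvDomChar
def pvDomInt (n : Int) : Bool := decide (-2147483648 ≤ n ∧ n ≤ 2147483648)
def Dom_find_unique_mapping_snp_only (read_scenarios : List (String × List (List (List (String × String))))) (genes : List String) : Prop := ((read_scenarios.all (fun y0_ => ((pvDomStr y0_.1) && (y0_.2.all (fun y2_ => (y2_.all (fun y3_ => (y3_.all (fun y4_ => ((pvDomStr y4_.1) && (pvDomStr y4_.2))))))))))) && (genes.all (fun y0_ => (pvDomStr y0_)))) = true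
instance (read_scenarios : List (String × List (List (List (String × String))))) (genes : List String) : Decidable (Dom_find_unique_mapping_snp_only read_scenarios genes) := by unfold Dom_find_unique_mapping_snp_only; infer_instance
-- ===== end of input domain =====

-- B replaces A's per-gene rescan of every row (O(G^2) row work) by one summary pass per strand:
-- the flattened rows build a per-position hit-set profile, reduced once to (winner genes, intersection
-- of nonempty hit sets), so each gene's two conditions become membership tests.

-- row[k] totalized with default "" ; Pre_ excludes the inputs where the Python raises KeyError (shared by both ports)
def pvRowGet (row : List (String × String)) (k : String) : String :=
  ((PySem.Dict.mk row).get? k).getD ""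

-- ===== PORT A =====
-- one row of A's scan: add the position, and extend each matching gene's position set
def pvStepA (genes : List String) (st : PySem.Set String × PySem.Dict String (PySem.Set String))
    (row : List (String × String)) : PySem.Set String × PySem.Dict String (PySem.Set String) :=
  let msaPos := pvRowGet row "MSA_Position"
  (PySem.Set.add st.1 msaPos,
   genes.foldl (fun mp g =>
      if PySem.Str.upper (pvRowGet row "Read_Base") == PySem.Str.upper (pvRowGet row (g ++ "_Base"))
      then mp.insert g (PySem.Set.add (mp.getD g []) msaPos)
      else mp) st.2)

-- A's nested check_conditions(scenarios, gene)
def pvCheckConditions (genes : List String) (scenarios : List (List (List (String × String))))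
    (gene : String) : Bool × Bool :=
  if scenarios = [] then (false, false)
  else
    let st := scenarios.foldl (fun st scenario => scenario.foldl (pvStepA genes) st)
      (([] : PySem.Set String), (PySem.Dict.empty : PySem.Dict String (PySem.Set String)))
    let c1 := st.1.any (fun pos =>
      PySem.Set.contains (st.2.getD gene []) pos &&
      genes.all (fun g => g == gene || !(PySem.Set.contains (st.2.getD g []) pos)))
    let c2 := st.1.all (fun pos =>
      PySem.Set.contains (st.2.getD gene []) pos ||
      genes.all (fun g => g == gene || !(PySem.Set.contains (st.2.getD g []) pos)))
    (c1, c2)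

def find_unique_mapping_snp_only (read_scenarios : List (String × List (List (List (String × String))))) (genes : List String) : String × Bool × String :=
  let plus_data := ((PySem.Dict.mk read_scenarios).get? "plus").getD []
  let minus_data := ((PySem.Dict.mk read_scenarios).get? "minus").getD []
  if plus_data = [] ∧ minus_data = [] then ("NONE", false, "")
  else
    let has_both_strands : Bool := !plus_data.isEmpty && !minus_data.isEmpty
    let mapped_genes : List String :=
      if has_both_strands then
        genes.foldl (fun acc gene =>
          let pc := pvCheckConditions genes plus_data gene
          let mc := pvCheckConditions genes minus_data gene
          if (pc.1 && pc.2 && mc.2) || (mc.1 && mc.2 && pc.2) then acc ++ [gene] else acc) []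
      else
        let strand_data := if ¬ plus_data = [] then plus_data else minus_data
        genes.foldl (fun acc gene =>
          let c := pvCheckConditions genes strand_data gene
          if c.1 && c.2 then acc ++ [gene] else acc) []
    let assignment := if mapped_genes.length = 1 then mapped_genes.headD "NONE" else "NONE"
    let strand_info :=
      if ¬ assignment = "NONE" then
        if has_both_strands then "both"
        else if ¬ plus_data = [] then "plus"
        else if ¬ minus_data = [] then "minus"
        else ""
      else ""
    (assignment, has_both_strands, strand_info)

-- ===== PORT B =====
-- B's profile pass: one row of the flattened row stream merges its matching genes into its position's hit set
def pvProfileStep (genes : List String) (prof : PySem.Dict String (PySem.Set String))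
    (row : List (String × String)) : PySem.Dict String (PySem.Set String) :=
  let pos := pvRowGet row "MSA_Position"
  let rb := PySem.Str.upper (pvRowGet row "Read_Base")
  let hits := genes.foldl (fun s g =>
      if rb == PySem.Str.upper (pvRowGet row (g ++ "_Base")) then PySem.Set.add s g else s)
    (prof.getD pos [])
  prof.insert pos hits

-- B's reduction pass over profile.values: winners = genes with a singleton hit set somewhere,
-- common = intersection of all nonempty hit sets (none = no nonempty hit set seen)
def pvSummarize (vals : List (PySem.Set String)) : PySem.Set String × Option (PySem.Set String) :=
  vals.foldl (fun st hits =>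
    if hits.isEmpty then st
    else
      ((if hits.length == 1 then PySem.Set.update st.1 hits else st.1),
       some (match st.2 with
             | none => PySem.Set.ofList hits
             | some cm => PySem.Set.inter cm hits)))
    (([] : PySem.Set String), (none : Option (PySem.Set String)))

-- strand_summary(scenarios)
def pvStrandSummary (genes : List String) (scenarios : List (List (List (String × String)))) :
    PySem.Set String × Option (PySem.Set String) :=
  pvSummarize ((scenarios.flatten.foldl (pvProfileStep genes)
    (PySem.Dict.empty : PySem.Dict String (PySem.Set String))).values)

-- no_contradiction(summary, gene)
def pvNoContradiction (s : PySem.Set String × Option (PySem.Set String)) (gene : String) : Bool :=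
  match s.2 with
  | none => true
  | some cm => PySem.Set.contains cm gene

def find_unique_mapping_snp_only_alt (read_scenarios : List (String × List (List (List (String × String))))) (genes : List String) : String × Bool × String :=
  let plus_data := ((PySem.Dict.mk read_scenarios).get? "plus").getD []
  let minus_data := ((PySem.Dict.mk read_scenarios).get? "minus").getD []
  if plus_data = [] ∧ minus_data = [] then ("NONE", false, "")
  else
    let has_both_strands : Bool := !plus_data.isEmpty && !minus_data.isEmpty
    let mapped_genes : List String :=
      if has_both_strands then
        let ps := pvStrandSummary genes plus_data
        let ms := pvStrandSummary genes minus_data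
        genes.filter (fun g => pvNoContradiction ps g && pvNoContradiction ms g &&
          (PySem.Set.contains ps.1 g || PySem.Set.contains ms.1 g))
      else
        let s := pvStrandSummary genes (if ¬ plus_data = [] then plus_data else minus_data)
        genes.filter (fun g => PySem.Set.contains s.1 g && pvNoContradiction s g)
    let assignment := if mapped_genes.length = 1 then mapped_genes.headD "NONE" else "NONE"
    let strand_info :=
      if ¬ assignment = "NONE" then
        if has_both_strands then "both" else if ¬ plus_data = [] then "plus" else "minus"
      else ""
    (assignment, has_both_strands, strand_info)

-- ===== PRECONDITION & SPEC =====
-- Pre_ excludes exactly the inputs where the Python A raises KeyError: a row of a used strand missing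
-- 'MSA_Position', 'Read_Base' or one of the '<gene>_Base' keys.
def Pre_find_unique_mapping_snp_only (read_scenarios : List (String × List (List (List (String × String))))) (genes : List String) : Prop :=
  ∀ scenario ∈ (((PySem.Dict.mk read_scenarios).get? "plus").getD [] ++
                ((PySem.Dict.mk read_scenarios).get? "minus").getD []),
    ∀ row ∈ scenario,
      (PySem.Dict.mk row).contains "MSA_Position" = true ∧
      (PySem.Dict.mk row).contains "Read_Base" = true ∧
      ∀ g ∈ genes, (PySem.Dict.mk row).contains (g ++ "_Base") = true
instance (read_scenarios : List (String × List (List (List (String × String))))) (genes : List String) : Decidable (Pre_find_unique_mapping_snp_only read_scenarios genes) := by unfold Pre_find_unique_mapping_snp_only; infer_instance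

def pvWitness_find_unique_mapping_snp_only : (List (String × List (List (List (String × String))))) × List String :=
  ([("plus", [[[("MSA_Position", "3"), ("Read_Base", "a"), ("g1_Base", "A"), ("g2_Base", "C")]]])], ["g1", "g2"])

def Spec_find_unique_mapping_snp_only (read_scenarios : List (String × List (List (List (String × String))))) (genes : List String) (out : String × Bool × String) : Prop := out = find_unique_mapping_snp_only_alt read_scenarios genes
instance (read_scenarios : List (String × List (List (List (String × String))))) (genes : List String) (out : String × Bool × String) : Decidable (Spec_find_unique_mapping_snp_only read_scenarios genes out) := by unfold Spec_find_unique_mapping_snp_only; infer_instance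

-- ===== CLAIM (what is proved, stated in full; the proofs are below) =====
def Claim_equal_find_unique_mapping_snp_only : Prop := ∀ (read_scenarios : List (String × List (List (List (String × String))))) (genes : List String), Dom_find_unique_mapping_snp_only read_scenarios genes → Pre_find_unique_mapping_snp_only read_scenarios genes → Spec_find_unique_mapping_snp_only read_scenarios genes (find_unique_mapping_snp_only read_scenarios genes)

-- ===== LEMMAS AND PROOFS =====

theorem pv_foldl_flatten {α β : Type} (f : β → α → β) (L : List (List α)) (b : β) :
    L.flatten.foldl f b = L.foldl (fun b xs => xs.foldl f b) b := by
  induction L generalizing b with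
  | nil => rfl
  | cons x t ih => simp [List.foldl_append, ih]

-- membership in a gene's position set after A's inner loop over genes
theorem pvFoldA_mem (c : String → Bool) (p : String) (l : List String)
    (mp : PySem.Dict String (PySem.Set String)) (g q : String) :
    q ∈ (l.foldl (fun mp g =>
          if c g then mp.insert g (PySem.Set.add (mp.getD g []) p) else mp) mp).getD g [] ↔
      (g ∈ l ∧ c g = true ∧ q = p) ∨ q ∈ mp.getD g [] := by
  induction l generalizing mp with
  | nil => simp
  | cons a t ih =>
    simp only [List.foldl_cons]
    by_cases hca : c a = true
    · rw [if_pos hca, ih]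
      rw [PySem.Dict.getD_insert]
      by_cases hga : g = a
      · subst hga
        rw [if_pos rfl, PySem.Set.mem_add]
        constructor
        · rintro (⟨hg, hcg, hq⟩ | hm | hq)
          · exact Or.inl ⟨List.mem_cons_of_mem _ hg, hcg, hq⟩
          · exact Or.inr hm
          · exact Or.inl ⟨List.mem_cons_self .., hca, hq⟩
        · rintro (⟨-, hcg, hq⟩ | hm)
          · exact Or.inr (Or.inr hq)
          · exact Or.inr (Or.inl hm)
      · rw [if_neg hga]
        constructor
        · rintro (⟨hg, hcg, hq⟩ | hm)
          · exact Or.inl ⟨List.mem_cons_of_mem _ hg, hcg, hq⟩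
          · exact Or.inr hm
        · rintro (⟨hg, hcg, hq⟩ | hm)
          · rcases List.mem_cons.mp hg with rfl | hg
            · exact absurd rfl hga
            · exact Or.inl ⟨hg, hcg, hq⟩
          · exact Or.inr hm
    · rw [if_neg hca, ih]
      constructor
      · rintro (⟨hg, hcg, hq⟩ | hm)
        · exact Or.inl ⟨List.mem_cons_of_mem _ hg, hcg, hq⟩
        · exact Or.inr hm
      · rintro (⟨hg, hcg, hq⟩ | hm)
        · rcases List.mem_cons.mp hg with rfl | hg
          · exact absurd hcg hca
          · exact Or.inl ⟨hg, hcg, hq⟩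
        · exact Or.inr hm

-- membership in a position's hit set after B's inner loop over genes
theorem pvFoldB_mem (c : String → Bool) (l : List String) (s0 : PySem.Set String) (q : String) :
    q ∈ l.foldl (fun s g => if c g then PySem.Set.add s g else s) s0 ↔
      (q ∈ l ∧ c q = true) ∨ q ∈ s0 := by
  induction l generalizing s0 with
  | nil => simp
  | cons a t ih =>
    simp only [List.foldl_cons]
    by_cases hca : c a = true
    · rw [if_pos hca, ih, PySem.Set.mem_add]
      constructor
      · rintro (⟨hq, hcq⟩ | hm | hq)
        · exact Or.inl ⟨List.mem_cons_of_mem _ hq, hcq⟩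
        · exact Or.inr hm
        · exact Or.inl ⟨by simp [hq], by rwa [hq]⟩
      · rintro (⟨hq, hcq⟩ | hm)
        · rcases List.mem_cons.mp hq with rfl | hq
          · exact Or.inr (Or.inr rfl)
          · exact Or.inl ⟨hq, hcq⟩
        · exact Or.inr (Or.inl hm)
    · rw [if_neg hca, ih]
      constructor
      · rintro (⟨hq, hcq⟩ | hm)
        · exact Or.inl ⟨List.mem_cons_of_mem _ hq, hcq⟩
        · exact Or.inr hm
      · rintro (⟨hq, hcq⟩ | hm)
        · rcases List.mem_cons.mp hq with rfl | hq
          · exact absurd hcq hca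
          · exact Or.inl ⟨hq, hcq⟩
        · exact Or.inr hm

theorem pvFoldB_nodup (c : String → Bool) (l : List String) (s0 : PySem.Set String)
    (h : s0.Nodup) : (l.foldl (fun s g => if c g then PySem.Set.add s g else s) s0).Nodup := by
  induction l generalizing s0 with
  | nil => exact h
  | cons a t ih =>
    simp only [List.foldl_cons]
    by_cases hca : c a = true
    · rw [if_pos hca]; exact ih _ (PySem.Set.nodup_add s0 a h)
    · rw [if_neg hca]; exact ih _ h

-- The invariant tying A's state (positions seen, gene -> positions matched) to B's profile (pos -> genes matched)
def pvInv (genes : List String) (st : PySem.Set String × PySem.Dict String (PySem.Set String))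
    (prof : PySem.Dict String (PySem.Set String)) : Prop :=
  prof.keys.Nodup ∧
  (∀ pos, pos ∈ st.1 ↔ prof.contains pos = true) ∧
  (∀ g pos, pos ∈ st.2.getD g [] ↔ g ∈ prof.getD pos []) ∧
  (∀ g pos, g ∈ prof.getD pos [] → g ∈ genes) ∧
  (∀ pos, (prof.getD pos []).Nodup)

theorem pvInv_init (genes : List String) :
    pvInv genes (([] : PySem.Set String), (PySem.Dict.empty : PySem.Dict String (PySem.Set String)))
      PySem.Dict.empty := by
  refine ⟨?_, ?_, ?_, ?_, ?_⟩ <;>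
    simp [PySem.Dict.keys_empty, PySem.Dict.getD_empty, PySem.Dict.contains_empty]

theorem pvInv_step (genes : List String) (st : PySem.Set String × PySem.Dict String (PySem.Set String))
    (prof : PySem.Dict String (PySem.Set String)) (row : List (String × String))
    (h : pvInv genes st prof) : pvInv genes (pvStepA genes st row) (pvProfileStep genes prof row) := by
  obtain ⟨hnd, h1, h2, h3, h4⟩ := h
  unfold pvStepA pvProfileStep
  set pos := pvRowGet row "MSA_Position" with hpos
  set c : String → Bool :=
    fun g => PySem.Str.upper (pvRowGet row "Read_Base") == PySem.Str.upper (pvRowGet row (g ++ "_Base")) with hc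
  set hits := genes.foldl (fun s g => if c g then PySem.Set.add s g else s) (prof.getD pos []) with hh
  have hitsMem : ∀ q, q ∈ hits ↔ (q ∈ genes ∧ c q = true) ∨ q ∈ prof.getD pos [] := fun q =>
    pvFoldB_mem c genes (prof.getD pos []) q
  refine ⟨PySem.Dict.nodup_keys_insert _ _ _ hnd, ?_, ?_, ?_, ?_⟩
  · intro p
    rw [PySem.Set.mem_add, PySem.Dict.contains_insert, h1 p]
    simp only [Bool.or_eq_true, beq_iff_eq]
    tauto
  · intro g q
    rw [pvFoldA_mem c pos genes st.2 g q, PySem.Dict.getD_insert]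
    by_cases hq : q = pos
    · subst hq
      rw [if_pos rfl, hitsMem g]
      constructor
      · rintro (⟨hg, hcg, -⟩ | hm)
        · exact Or.inl ⟨hg, hcg⟩
        · exact Or.inr ((h2 g pos).mp hm)
      · rintro (⟨hg, hcg⟩ | hm)
        · exact Or.inl ⟨hg, hcg, rfl⟩
        · exact Or.inr ((h2 g pos).mpr hm)
    · rw [if_neg hq]
      constructor
      · rintro (⟨-, -, hqp⟩ | hm)
        · exact absurd hqp hq
        · exact (h2 g q).mp hm
      · intro hm
        exact Or.inr ((h2 g q).mpr hm)
  · intro g q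
    rw [PySem.Dict.getD_insert]
    by_cases hq : q = pos
    · rw [if_pos hq]
      intro hg
      rcases (hitsMem g).mp hg with ⟨hg, -⟩ | hm
      · exact hg
      · exact h3 g pos hm
    · rw [if_neg hq]; exact h3 g q
  · intro q
    rw [PySem.Dict.getD_insert]
    by_cases hq : q = pos
    · rw [if_pos hq]; exact pvFoldB_nodup c genes (prof.getD pos []) (h4 pos)
    · rw [if_neg hq]; exact h4 q

theorem pvInv_scan (genes : List String) (scenarios : List (List (List (String × String)))) :
    pvInv genes
      (scenarios.foldl (fun st scenario => scenario.foldl (pvStepA genes) st)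
        (([] : PySem.Set String), (PySem.Dict.empty : PySem.Dict String (PySem.Set String))))
      (scenarios.flatten.foldl (pvProfileStep genes)
        (PySem.Dict.empty : PySem.Dict String (PySem.Set String))) := by
  rw [pv_foldl_flatten]
  have rows : ∀ (rs : List (List (String × String)))
      (st : PySem.Set String × PySem.Dict String (PySem.Set String))
      (prof : PySem.Dict String (PySem.Set String)), pvInv genes st prof →
      pvInv genes (rs.foldl (pvStepA genes) st) (rs.foldl (pvProfileStep genes) prof) := by
    intro rs
    induction rs with
    | nil => exact fun _ _ h => h
    | cons r t ih => exact fun st prof h => ih _ _ (pvInv_step genes st prof r h)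
  have gen : ∀ (scens : List (List (List (String × String))))
      (st : PySem.Set String × PySem.Dict String (PySem.Set String))
      (prof : PySem.Dict String (PySem.Set String)), pvInv genes st prof →
      pvInv genes (scens.foldl (fun st scenario => scenario.foldl (pvStepA genes) st) st)
        (scens.foldl (fun prof scenario => scenario.foldl (pvProfileStep genes) prof) prof) := by
    intro scens
    induction scens with
    | nil => exact fun _ _ h => h
    | cons s t ih => exact fun st prof h => ih _ _ (rows s st prof h)
  exact gen scenarios _ _ (pvInv_init genes)

-- one hit set: A's "unique match at this position" is "singleton set containing the gene"
theorem pvHits_c1 (genes : List String) (gene : String) (hits : List String)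
    (hsub : ∀ g ∈ hits, g ∈ genes) (hnd : hits.Nodup) :
    (gene ∈ hits ∧ ∀ g ∈ genes, g = gene ∨ g ∉ hits) ↔ (hits.length = 1 ∧ gene ∈ hits) := by
  constructor
  · rintro ⟨hmem, hoth⟩
    have hall : ∀ x ∈ hits, x = gene := fun x hx =>
      (hoth x (hsub x hx)).resolve_right (fun hn => hn hx)
    refine ⟨?_, hmem⟩
    cases hits with
    | nil => cases hmem
    | cons a t =>
      have hat : a = gene := hall a (List.mem_cons_self ..)
      have ht : t = [] := by
        rw [List.eq_nil_iff_forall_not_mem]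
        intro x hx
        have := hall x (List.mem_cons_of_mem _ hx)
        exact (List.nodup_cons.mp hnd).1 (by rw [hat, ← this]; exact hx)
      simp [ht]
  · rintro ⟨hlen, hmem⟩
    obtain ⟨a, ha⟩ := List.length_eq_one_iff.mp hlen
    subst ha
    rcases List.mem_singleton.mp hmem with rfl
    refine ⟨hmem, fun g _ => ?_⟩
    by_cases hgg : g = gene
    · exact Or.inl hgg
    · exact Or.inr (fun hgm => hgg (List.mem_singleton.mp hgm))

-- one hit set: A's "no contradiction at this position" is "empty or contains the gene"
theorem pvHits_c2 (genes : List String) (gene : String) (hits : List String)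
    (hsub : ∀ g ∈ hits, g ∈ genes) :
    (gene ∈ hits ∨ ∀ g ∈ genes, g = gene ∨ g ∉ hits) ↔ (hits = [] ∨ gene ∈ hits) := by
  constructor
  · rintro (hmem | hoth)
    · exact Or.inr hmem
    · cases hits with
      | nil => exact Or.inl rfl
      | cons a t =>
        have : a = gene ∨ a ∉ a :: t := hoth a (hsub a (List.mem_cons_self ..))
        rcases this with rfl | hn
        · exact Or.inr (List.mem_cons_self ..)
        · exact absurd (List.mem_cons_self ..) hn
  · rintro (rfl | hmem)
    · exact Or.inr (fun g _ => Or.inr (List.not_mem_nil))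
    · exact Or.inl hmem

-- winners component of B's reduction: exactly the genes with a singleton hit set somewhere
theorem pvSummarize_winners (vals : List (PySem.Set String)) (g : String) :
    PySem.Set.contains (pvSummarize vals).1 g = true ↔ ∃ h ∈ vals, h.length = 1 ∧ g ∈ h := by
  rw [PySem.Set.contains_iff]
  unfold pvSummarize
  have gen : ∀ (vs : List (PySem.Set String)) (st : PySem.Set String × Option (PySem.Set String)),
      g ∈ (vs.foldl (fun st hits =>
        if hits.isEmpty then st
        else
          ((if hits.length == 1 then PySem.Set.update st.1 hits else st.1),
           some (match st.2 with
                 | none => PySem.Set.ofList hits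
                 | some cm => PySem.Set.inter cm hits))) st).1 ↔
      g ∈ st.1 ∨ ∃ h ∈ vs, h.length = 1 ∧ g ∈ h := by
    intro vs
    induction vs with
    | nil => simp
    | cons v t ih =>
      intro st
      simp only [List.foldl_cons]
      by_cases hve : v.isEmpty = true
      · rw [if_pos hve, ih]
        have hvnil : v = [] := List.isEmpty_iff.mp hve
        subst hvnil
        constructor
        · rintro (hm | ⟨h, hh, hp⟩)
          · exact Or.inl hm
          · exact Or.inr ⟨h, List.mem_cons_of_mem _ hh, hp⟩
        · rintro (hm | ⟨h, hh, hp⟩)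
          · exact Or.inl hm
          · rcases List.mem_cons.mp hh with rfl | hh
            · simp at hp
            · exact Or.inr ⟨h, hh, hp⟩
      · rw [if_neg hve, ih]
        by_cases hv1 : (v.length == 1) = true
        · rw [if_pos hv1, PySem.Set.mem_update]
          constructor
          · rintro ((hm | hgv) | ⟨h, hh, hp⟩)
            · exact Or.inl hm
            · exact Or.inr ⟨v, List.mem_cons_self .., beq_iff_eq.mp hv1, hgv⟩
            · exact Or.inr ⟨h, List.mem_cons_of_mem _ hh, hp⟩
          · rintro (hm | ⟨h, hh, hp⟩)
            · exact Or.inl (Or.inl hm)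
            · rcases List.mem_cons.mp hh with rfl | hh
              · exact Or.inl (Or.inr hp.2)
              · exact Or.inr ⟨h, hh, hp⟩
        · rw [if_neg hv1]
          constructor
          · rintro (hm | ⟨h, hh, hp⟩)
            · exact Or.inl hm
            · exact Or.inr ⟨h, List.mem_cons_of_mem _ hh, hp⟩
          · rintro (hm | ⟨h, hh, hp⟩)
            · exact Or.inl hm
            · rcases List.mem_cons.mp hh with rfl | hh
              · exact absurd (beq_iff_eq.mpr hp.1) (fun hc => hv1 hc)
              · exact Or.inr ⟨h, hh, hp⟩
  rw [gen vals _]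
  simp

-- common component of B's reduction: "none or contains the gene" is "every hit set is empty or contains it"
theorem pvSummarize_common (vals : List (PySem.Set String)) (g : String) :
    pvNoContradiction (pvSummarize vals) g = true ↔ ∀ h ∈ vals, h = [] ∨ g ∈ h := by
  have nc : ∀ (p : PySem.Set String × Option (PySem.Set String)),
      pvNoContradiction p g = true ↔ ∀ cm, p.2 = some cm → g ∈ cm := by
    rintro ⟨w, _ | cm⟩
    · simp [pvNoContradiction]
    · show PySem.Set.contains cm g = true ↔ _
      rw [PySem.Set.contains_iff]
      constructor
      · intro h cm' hcm'
        cases hcm'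
        exact h
      · intro h
        exact h cm rfl
  have gen : ∀ (vs : List (PySem.Set String)) (st : PySem.Set String × Option (PySem.Set String)),
      (∀ cm, (vs.foldl (fun st hits =>
        if hits.isEmpty then st
        else
          ((if hits.length == 1 then PySem.Set.update st.1 hits else st.1),
           some (match st.2 with
                 | none => PySem.Set.ofList hits
                 | some cm => PySem.Set.inter cm hits))) st).2 = some cm → g ∈ cm) ↔
      ((∀ cm, st.2 = some cm → g ∈ cm) ∧ ∀ h ∈ vs, h = [] ∨ g ∈ h) := by
    intro vs
    induction vs with
    | nil => simp
    | cons v t ih =>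
      intro st
      simp only [List.foldl_cons]
      by_cases hve : v.isEmpty = true
      · rw [if_pos hve, ih]
        have hvnil : v = [] := List.isEmpty_iff.mp hve
        subst hvnil
        simp
      · rw [if_neg hve, ih]
        have hvne : ¬ v = [] := fun h => hve (by simp [h])
        rcases hst : st.2 with _ | cm
        · simp only [hst]
          constructor
          · rintro ⟨hcm, ht⟩
            have hgv : g ∈ v := by
              have := hcm (PySem.Set.ofList v) rfl
              exact (PySem.Set.mem_ofList _ _).mp this
            exact ⟨by simp, fun h hh => by
              rcases List.mem_cons.mp hh with rfl | hh
              · exact Or.inr hgv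
              · exact ht h hh⟩
          · rintro ⟨-, hall⟩
            have hgv : g ∈ v := (hall v (List.mem_cons_self ..)).resolve_left hvne
            exact ⟨fun cm hcm => by
                cases hcm
                exact (PySem.Set.mem_ofList _ _).mpr hgv,
              fun h hh => hall h (List.mem_cons_of_mem _ hh)⟩
        · simp only [hst]
          constructor
          · rintro ⟨hcm, ht⟩
            have hgi : g ∈ PySem.Set.inter cm v := hcm _ rfl
            have := (PySem.Set.mem_inter _ _ _).mp hgi
            exact ⟨fun cm' hcm' => by cases hcm'; exact this.1,
              fun h hh => by
                rcases List.mem_cons.mp hh with rfl | hh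
                · exact Or.inr this.2
                · exact ht h hh⟩
          · rintro ⟨hcm, hall⟩
            have hgv : g ∈ v := (hall v (List.mem_cons_self ..)).resolve_left hvne
            exact ⟨fun cm' hcm' => by
                cases hcm'
                exact (PySem.Set.mem_inter _ _ _).mpr ⟨hcm cm rfl, hgv⟩,
              fun h hh => hall h (List.mem_cons_of_mem _ hh)⟩
  rw [nc]
  unfold pvSummarize
  rw [gen vals _]
  simp

-- python's 'if cond: out.append(x)' loop is a filter
theorem pv_foldl_filter (p : String → Bool) (l : List String) (acc : List String) :
    l.foldl (fun a x => if p x then a ++ [x] else a) acc = acc ++ l.filter p := by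
  induction l generalizing acc with
  | nil => simp
  | cons x t ih =>
    simp only [List.foldl_cons, List.filter_cons]
    by_cases hx : p x = true
    · rw [if_pos hx, ih, hx]; simp
    · rw [if_neg hx, ih]
      simp only [Bool.not_eq_true] at hx
      simp [hx]

-- per-gene bridge: A's check_conditions equals B's two membership tests
theorem pvCheck_eq (genes : List String) (scenarios : List (List (List (String × String))))
    (gene : String) (hne : ¬ scenarios = []) :
    pvCheckConditions genes scenarios gene =
      (PySem.Set.contains (pvStrandSummary genes scenarios).1 gene,
       pvNoContradiction (pvStrandSummary genes scenarios) gene) := by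
  obtain ⟨hnd, h1, h2, h3, h4⟩ := pvInv_scan genes scenarios
  simp only [pvCheckConditions, if_neg hne, pvStrandSummary]
  set st := scenarios.foldl (fun st scenario => scenario.foldl (pvStepA genes) st)
      (([] : PySem.Set String), (PySem.Dict.empty : PySem.Dict String (PySem.Set String))) with hst
  set prof := scenarios.flatten.foldl (pvProfileStep genes)
      (PySem.Dict.empty : PySem.Dict String (PySem.Set String)) with hprof
  have hpred : ∀ pos,
      (PySem.Set.contains (st.2.getD gene []) pos &&
        genes.all (fun g => g == gene || !(PySem.Set.contains (st.2.getD g []) pos))) = true ↔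
      (gene ∈ prof.getD pos [] ∧ ∀ g ∈ genes, g = gene ∨ g ∉ prof.getD pos []) := by
    intro pos
    simp only [Bool.and_eq_true, List.all_eq_true, Bool.or_eq_true, beq_iff_eq,
      Bool.not_eq_true', PySem.Set.contains_eq_decide, decide_eq_true_eq,
      decide_eq_false_iff_not, h2]
  have hpred2 : ∀ pos,
      (PySem.Set.contains (st.2.getD gene []) pos ||
        genes.all (fun g => g == gene || !(PySem.Set.contains (st.2.getD g []) pos))) = true ↔
      (gene ∈ prof.getD pos [] ∨ ∀ g ∈ genes, g = gene ∨ g ∉ prof.getD pos []) := by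
    intro pos
    simp only [Bool.or_eq_true, List.all_eq_true, beq_iff_eq,
      Bool.not_eq_true', PySem.Set.contains_eq_decide, decide_eq_true_eq,
      decide_eq_false_iff_not, h2]
  refine Prod.ext ?_ ?_
  · rw [Bool.eq_iff_iff, List.any_eq_true, pvSummarize_winners]
    constructor
    · rintro ⟨pos, hpos, hpA⟩
      obtain ⟨hmem, hoth⟩ := (hpred pos).mp hpA
      have hc : prof.contains pos = true := (h1 pos).mp hpos
      rcases hv : prof.get? pos with _ | hits
      · rw [PySem.Dict.contains_eq_isSome_get?, hv] at hc; cases hc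
      · have hitems := PySem.Dict.mem_items_of_get?_eq_some prof hv
        have hgetD : prof.getD pos [] = hits := PySem.Dict.getD_of_get?_eq_some prof [] hv
        refine ⟨hits, List.mem_map.mpr ⟨(pos, hits), hitems, rfl⟩, ?_⟩
        rw [← hgetD]
        exact (pvHits_c1 genes gene _ (h3 · _) (h4 pos)).mp ⟨hmem, hoth⟩
    · rintro ⟨hits, hmemv, hpB⟩
      obtain ⟨⟨pos, hits'⟩, hitems, rfl⟩ := List.mem_map.mp hmemv
      have hgetD : prof.getD pos [] = hits' := PySem.Dict.getD_of_mem_items prof hitems hnd []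
      have hc : prof.contains pos = true :=
        (PySem.Dict.contains_iff_mem_keys prof pos).mpr (PySem.Dict.mem_keys_of_mem_items prof hitems)
      refine ⟨pos, (h1 pos).mpr hc, (hpred pos).mpr ?_⟩
      rw [hgetD]
      rw [← hgetD] at hpB ⊢
      exact (pvHits_c1 genes gene _ (h3 · _) (h4 pos)).mpr hpB
  · rw [Bool.eq_iff_iff, List.all_eq_true, pvSummarize_common]
    constructor
    · intro hA hits hmemv
      obtain ⟨⟨pos, hits'⟩, hitems, rfl⟩ := List.mem_map.mp hmemv
      have hgetD : prof.getD pos [] = hits' := PySem.Dict.getD_of_mem_items prof hitems hnd []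
      have hc : prof.contains pos = true :=
        (PySem.Dict.contains_iff_mem_keys prof pos).mpr (PySem.Dict.mem_keys_of_mem_items prof hitems)
      have := (hpred2 pos).mp (hA pos ((h1 pos).mpr hc))
      rw [hgetD] at this
      exact (pvHits_c2 genes gene _ (fun g hgm => h3 g pos (hgetD ▸ hgm))).mp this
    · intro hB pos hpos
      have hc : prof.contains pos = true := (h1 pos).mp hpos
      rcases hv : prof.get? pos with _ | hits
      · rw [PySem.Dict.contains_eq_isSome_get?, hv] at hc; cases hc
      · have hitems := PySem.Dict.mem_items_of_get?_eq_some prof hv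
        have hgetD : prof.getD pos [] = hits := PySem.Dict.getD_of_get?_eq_some prof [] hv
        have hpB := hB hits (List.mem_map.mpr ⟨(pos, hits), hitems, rfl⟩)
        refine (hpred2 pos).mpr ?_
        rw [hgetD]
        exact (pvHits_c2 genes gene _ (fun g hgm => h3 g pos (hgetD ▸ hgm))).mpr hpB

-- ===== VERDICT (by name: the statement is the Claim_ definition above) =====
theorem find_unique_mapping_snp_only_spec : Claim_equal_find_unique_mapping_snp_only := by
  intro rs genes _dom _pre
  unfold Spec_find_unique_mapping_snp_only
  simp only [find_unique_mapping_snp_only, find_unique_mapping_snp_only_alt]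
  set plus := ((PySem.Dict.mk rs).get? "plus").getD [] with hplus
  set minus := ((PySem.Dict.mk rs).get? "minus").getD [] with hminus
  by_cases hempty : plus = [] ∧ minus = []
  · rw [if_pos hempty, if_pos hempty]
  · rw [if_neg hempty, if_neg hempty]
    have hmapped :
        (if (!plus.isEmpty && !minus.isEmpty) = true then
          genes.foldl (fun acc gene =>
            let pc := pvCheckConditions genes plus gene
            let mc := pvCheckConditions genes minus gene
            if (pc.1 && pc.2 && mc.2) || (mc.1 && mc.2 && pc.2) then acc ++ [gene] else acc) []
        else
          genes.foldl (fun acc gene =>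
            let c := pvCheckConditions genes (if ¬ plus = [] then plus else minus) gene
            if c.1 && c.2 then acc ++ [gene] else acc) []) =
        (if (!plus.isEmpty && !minus.isEmpty) = true then
          genes.filter (fun g =>
            pvNoContradiction (pvStrandSummary genes plus) g &&
            pvNoContradiction (pvStrandSummary genes minus) g &&
            (PySem.Set.contains (pvStrandSummary genes plus).1 g ||
             PySem.Set.contains (pvStrandSummary genes minus).1 g))
        else
          genes.filter (fun g =>
            PySem.Set.contains (pvStrandSummary genes (if ¬ plus = [] then plus else minus)).1 g &&
            pvNoContradiction (pvStrandSummary genes (if ¬ plus = [] then plus else minus)) g)) := by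
      by_cases hboth : (!plus.isEmpty && !minus.isEmpty) = true
      · rw [if_pos hboth, if_pos hboth]
        have hp : ¬ plus = [] := fun h => by simp [h] at hboth
        have hm : ¬ minus = [] := fun h => by simp [h] at hboth
        have hfn : (fun (acc : List String) gene =>
              let pc := pvCheckConditions genes plus gene
              let mc := pvCheckConditions genes minus gene
              if (pc.1 && pc.2 && mc.2) || (mc.1 && mc.2 && pc.2) then acc ++ [gene] else acc) =
            (fun (acc : List String) g =>
              if (pvNoContradiction (pvStrandSummary genes plus) g &&
                  pvNoContradiction (pvStrandSummary genes minus) g &&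
                  (PySem.Set.contains (pvStrandSummary genes plus).1 g ||
                   PySem.Set.contains (pvStrandSummary genes minus).1 g)) then acc ++ [g] else acc) := by
          funext acc g
          simp only [pvCheck_eq genes plus g hp, pvCheck_eq genes minus g hm]
          cases hA : PySem.Set.contains (pvStrandSummary genes plus).1 g <;>
            cases hB : pvNoContradiction (pvStrandSummary genes plus) g <;>
              cases hC : PySem.Set.contains (pvStrandSummary genes minus).1 g <;>
                cases hD : pvNoContradiction (pvStrandSummary genes minus) g <;>
                  simp [hA, hB, hC, hD]
        rw [hfn, pv_foldl_filter, List.nil_append]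
      · rw [if_neg hboth, if_neg hboth]
        have hstrand : ¬ (if ¬ plus = [] then plus else minus) = [] := by
          by_cases hpe : plus = []
          · rw [if_neg (by simpa using hpe)]
            exact fun h => hempty ⟨hpe, h⟩
          · rwa [if_pos hpe]
        have hfn : (fun (acc : List String) gene =>
              let c := pvCheckConditions genes (if ¬ plus = [] then plus else minus) gene
              if c.1 && c.2 then acc ++ [gene] else acc) =
            (fun (acc : List String) g =>
              if (PySem.Set.contains (pvStrandSummary genes (if ¬ plus = [] then plus else minus)).1 g &&
                  pvNoContradiction (pvStrandSummary genes (if ¬ plus = [] then plus else minus)) g)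
              then acc ++ [g] else acc) := by
          funext acc g
          simp only [pvCheck_eq genes _ g hstrand]
        rw [hfn, pv_foldl_filter, List.nil_append]
    rw [hmapped]
    -- strand_info tails agree because plus and minus are not both empty
    by_cases hboth : (!plus.isEmpty && !minus.isEmpty) = true
    · simp [hboth]
    · simp only [Bool.not_eq_true] at hboth
      simp only [hboth, Bool.false_eq_true, if_false]
      by_cases hpe : plus = []
      · have hme : ¬ minus = [] := fun h => hempty ⟨hpe, h⟩
        simp [hpe, hme]
      · simp [hpe]
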